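-- pv_equiv track=rewrite | github.com/aerolicavoli/PancakeCNC | Pancake_esp/CommandTerminalV2.py | _apply_short_keys
-- ===== SOURCE A (Python) =====
-- from typing import Dict, List, Optional
--
-- SHORT_KEYS: Dict[str, Dict[str, str]] = {
--     "cnc_spiral": {
--         "sc": "SpiralConstant_mprad",
--         "sr": "SpiralRate_radps",
--         "ls": "LinearSpeed_mps",
--         "cx": "CenterX_m",
--         "cy": "CenterY_m",
--         "mr": "MaxRadius_m",
--     },
--     "cnc_sine": {
--         "a": "Amplitude_deg",
--         "f": "Frequency_hz",
--     },
--     "cnc_constant_speed": {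
--         "s0": "S0Speed_degps",
--         "s1": "S1Speed_degps",
--     },
--     "wait": {"t": "timeout_ms"},
--     "set_motor_limits": {
--         "m": "motor",
--         "a": "accel",
--         "s": "speed",
--     },
--     "set_pump_constant": {"pc": "pumpConstant_degpm"},
--     "cnc_jog": {
--         "x": "TargetX_m",
--         "y": "TargetY_m",
--         "ls": "LinearSpeed_mps",
--         "p": "PumpOn",
--     },
--     "cnc_arc": {
--         "st": "StartTheta_rad",
--         "et": "EndTheta_rad",
--         "r": "Radius_m",
--         "ls": "LinearSpeed_mps",
--         "cx": "CenterX_m",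
--         "cy": "CenterY_m",
--     },
--     "pump_purge": {
--         "ps": "pumpSpeed_degps",
--         "d": "duration_ms",
--     },
-- }
--
-- def _apply_short_keys(cmd: str, tokens: List[str]) -> List[str]:
--     """Expand short key tokens to full ``k=v`` strings."""
--
--     mapping = SHORT_KEYS.get(cmd, {})
--     out: List[str] = []
--     i = 0
--     while i < len(tokens):
--         tok = tokens[i]
--         if "=" in tok:
--             k, v = tok.split("=", 1)
--         elif ":" in tok:
--             k, v = tok.split(":", 1)
--         else:
--             if i + 1 >= len(tokens):
--                 raise ValueError(f"Missing value for {tok}")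
--             k, v = tok, tokens[i + 1]
--             i += 1
--         k = mapping.get(k, k)
--         out.append(f"{k}={v}")
--         i += 1
--     return out
-- ===== SOURCE B (Python) =====
-- from typing import Dict, List
--
-- SHORT_KEYS: Dict[str, Dict[str, str]] = {
--     "cnc_spiral": {
--         "sc": "SpiralConstant_mprad",
--         "sr": "SpiralRate_radps",
--         "ls": "LinearSpeed_mps",
--         "cx": "CenterX_m",
--         "cy": "CenterY_m",
--         "mr": "MaxRadius_m",
--     },
--     "cnc_sine": {
--         "a": "Amplitude_deg",
--         "f": "Frequency_hz",
--     },
--     "cnc_constant_speed": {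
--         "s0": "S0Speed_degps",
--         "s1": "S1Speed_degps",
--     },
--     "wait": {"t": "timeout_ms"},
--     "set_motor_limits": {
--         "m": "motor",
--         "a": "accel",
--         "s": "speed",
--     },
--     "set_pump_constant": {"pc": "pumpConstant_degpm"},
--     "cnc_jog": {
--         "x": "TargetX_m",
--         "y": "TargetY_m",
--         "ls": "LinearSpeed_mps",
--         "p": "PumpOn",
--     },
--     "cnc_arc": {
--         "st": "StartTheta_rad",
--         "et": "EndTheta_rad",
--         "r": "Radius_m",
--         "ls": "LinearSpeed_mps",
--         "cx": "CenterX_m",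
--         "cy": "CenterY_m",
--     },
--     "pump_purge": {
--         "ps": "pumpSpeed_degps",
--         "d": "duration_ms",
--     },
-- }
--
--
-- def _apply_short_keys(cmd: str, tokens: List[str]) -> List[str]:
--     """Expand short key tokens to full ``k=v`` strings.
--
--     State-machine formulation: one plain pass over ``tokens`` carrying a
--     one-slot ``pending`` register.  A bare token (no '=' / ':') is never
--     resolved by looking ahead; it is parked in ``pending`` and the NEXT
--     iteration consumes it as that token's key.  A leftover ``pending``
--     after the loop is the missing-value error.
--     """
--     mapping = SHORT_KEYS.get(cmd, {})
--     out: List[str] = []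
--     pending = None  # a bare key still waiting for its value
--     for tok in tokens:
--         if pending is not None:
--             out.append(f"{mapping.get(pending, pending)}={tok}")
--             pending = None
--         elif "=" in tok:
--             k, v = tok.split("=", 1)
--             out.append(f"{mapping.get(k, k)}={v}")
--         elif ":" in tok:
--             k, v = tok.split(":", 1)
--             out.append(f"{mapping.get(k, k)}={v}")
--         else:
--             pending = tok
--     if pending is not None:
--         raise ValueError(f"Missing value for {pending}")
--     return out
-- ===== Notes on version B (the rewrite author's own statement) =====
-- stated objective: alternative
-- what changed: A's index-driven while-loop that looks ahead at tokens[i+1] and skips it (i += 2) is replaced by a one-slot state-machine fold: a single for-loop carries a pending bare key, the NEXT iteration consumes it as the value, and the missing-value error is detected after the loop from leftover state instead of by a bounds check inside it.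
import Mathlib
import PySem

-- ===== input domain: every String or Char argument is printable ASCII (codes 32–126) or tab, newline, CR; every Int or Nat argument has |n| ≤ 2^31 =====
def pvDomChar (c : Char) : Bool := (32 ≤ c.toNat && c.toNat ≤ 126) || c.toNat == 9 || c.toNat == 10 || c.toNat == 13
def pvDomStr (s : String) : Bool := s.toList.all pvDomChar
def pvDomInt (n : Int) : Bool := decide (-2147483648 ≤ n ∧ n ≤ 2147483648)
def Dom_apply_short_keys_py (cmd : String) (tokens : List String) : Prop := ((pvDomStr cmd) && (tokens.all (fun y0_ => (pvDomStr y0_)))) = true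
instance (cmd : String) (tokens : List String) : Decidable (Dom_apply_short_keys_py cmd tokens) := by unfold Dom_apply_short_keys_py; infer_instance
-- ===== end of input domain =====

-- B replaces A's index-driven lookahead loop (peek tokens[i+1], skip it) by a one-slot
-- state-machine fold carrying a pending bare key, with the error detected after the loop;
-- alternative control structure, same cost.  Both versions raise ValueError on a trailing
-- bare token, which Pre_ excludes.


-- Module constant SHORT_KEYS (shared by both Python versions)
def pvShortKeys : PySem.Dict String (PySem.Dict String String) := PySem.Dict.ofList
  [ ("cnc_spiral", PySem.Dict.ofList
      [ ("sc", "SpiralConstant_mprad"), ("sr", "SpiralRate_radps"), ("ls", "LinearSpeed_mps"),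
        ("cx", "CenterX_m"), ("cy", "CenterY_m"), ("mr", "MaxRadius_m") ]),
    ("cnc_sine", PySem.Dict.ofList [ ("a", "Amplitude_deg"), ("f", "Frequency_hz") ]),
    ("cnc_constant_speed", PySem.Dict.ofList [ ("s0", "S0Speed_degps"), ("s1", "S1Speed_degps") ]),
    ("wait", PySem.Dict.ofList [ ("t", "timeout_ms") ]),
    ("set_motor_limits", PySem.Dict.ofList [ ("m", "motor"), ("a", "accel"), ("s", "speed") ]),
    ("set_pump_constant", PySem.Dict.ofList [ ("pc", "pumpConstant_degpm") ]),
    ("cnc_jog", PySem.Dict.ofList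
      [ ("x", "TargetX_m"), ("y", "TargetY_m"), ("ls", "LinearSpeed_mps"), ("p", "PumpOn") ]),
    ("cnc_arc", PySem.Dict.ofList
      [ ("st", "StartTheta_rad"), ("et", "EndTheta_rad"), ("r", "Radius_m"),
        ("ls", "LinearSpeed_mps"), ("cx", "CenterX_m"), ("cy", "CenterY_m") ]),
    ("pump_purge", PySem.Dict.ofList [ ("ps", "pumpSpeed_degps"), ("d", "duration_ms") ]) ]

-- ===== PORT A =====
-- A's while-loop over index i: i advances by 1 normally, by 2 when the value is taken from
-- the next token; ported as recursion on the remaining token list, with a fuel counter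
-- (initialised to the list length, so it never runs out) making termination structural.
-- The tuple unpack `k, v = tok.split(sep, 1)` always succeeds (the separator is in tok), so
-- it is ported as taking elements 0 and 1 of the split; the `rest = []` arm is where
-- Python raises ValueError (excluded by Pre_).
def pvLoopA (mapping : PySem.Dict String String) : Nat → List String → List String
  | 0, _ => []
  | _ + 1, [] => []
  | fuel + 1, tok :: rest =>
    if PySem.Str.isIn "=" tok then
      let parts := (PySem.Str.splitMax? tok "=" 1).getD []
      PySem.Str.join ""
        [PySem.Dict.getD mapping (parts.getD 0 "") (parts.getD 0 ""), "=", parts.getD 1 ""]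
        :: pvLoopA mapping fuel rest
    else if PySem.Str.isIn ":" tok then
      let parts := (PySem.Str.splitMax? tok ":" 1).getD []
      PySem.Str.join ""
        [PySem.Dict.getD mapping (parts.getD 0 "") (parts.getD 0 ""), "=", parts.getD 1 ""]
        :: pvLoopA mapping fuel rest
    else
      match rest with
      | [] => []  -- Python: raise ValueError (outside Pre_)
      | v :: rest' =>
          PySem.Str.join "" [PySem.Dict.getD mapping tok tok, "=", v]
            :: pvLoopA mapping fuel rest'

def apply_short_keys_py (cmd : String) (tokens : List String) : List String :=
  pvLoopA (PySem.Dict.getD pvShortKeys cmd (PySem.Dict.ofList [])) tokens.length tokens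

-- ===== PORT B =====
-- B's loop body: the state is (out, pending).  A pending bare key is consumed by the current
-- token; otherwise a separator token is split and emitted; otherwise the token is parked.
def pvStepB (mapping : PySem.Dict String String)
    (st : List String × Option String) (tok : String) : List String × Option String :=
  match st.2 with
  | some k => (st.1 ++ [PySem.Str.join "" [PySem.Dict.getD mapping k k, "=", tok]], none)
  | none =>
    if PySem.Str.isIn "=" tok then
      let parts := (PySem.Str.splitMax? tok "=" 1).getD []
      (st.1 ++ [PySem.Str.join ""
        [PySem.Dict.getD mapping (parts.getD 0 "") (parts.getD 0 ""), "=", parts.getD 1 ""]], none)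
    else if PySem.Str.isIn ":" tok then
      let parts := (PySem.Str.splitMax? tok ":" 1).getD []
      (st.1 ++ [PySem.Str.join ""
        [PySem.Dict.getD mapping (parts.getD 0 "") (parts.getD 0 ""), "=", parts.getD 1 ""]], none)
    else (st.1, some tok)

-- Python raises ValueError when pending is left over after the loop (outside Pre_);
-- the port returns the accumulated output.
def apply_short_keys_py_alt (cmd : String) (tokens : List String) : List String :=
  (tokens.foldl (pvStepB (PySem.Dict.getD pvShortKeys cmd (PySem.Dict.ofList []))) ([], none)).1

-- ===== PRECONDITION & SPEC =====
-- Pre_ excludes exactly the token lists on which A raises ValueError ("Missing value for …"):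
-- a bare token (no '=' or ':') that is the last token; B raises the same ValueError there.
-- Stated as a one-bit scan: the bit says "this position is consumed as a value".
def pvExpectBit (b : Bool) (tok : String) : Bool :=
  if b then false
  else !(PySem.Str.isIn "=" tok || PySem.Str.isIn ":" tok)

def Pre_apply_short_keys_py (cmd : String) (tokens : List String) : Prop :=
  tokens.foldl pvExpectBit false = false
instance (cmd : String) (tokens : List String) : Decidable (Pre_apply_short_keys_py cmd tokens) := by
  unfold Pre_apply_short_keys_py; infer_instance

def pvWitness_apply_short_keys_py : String × List String := ("wait", ["t", "5"])

def Spec_apply_short_keys_py (cmd : String) (tokens : List String) (out : List String) : Prop :=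
  out = apply_short_keys_py_alt cmd tokens
instance (cmd : String) (tokens : List String) (out : List String) : Decidable (Spec_apply_short_keys_py cmd tokens out) := by
  unfold Spec_apply_short_keys_py; infer_instance

-- ===== CLAIM =====
def Claim_equal_apply_short_keys_py : Prop := ∀ (cmd : String) (tokens : List String), Dom_apply_short_keys_py cmd tokens → Pre_apply_short_keys_py cmd tokens → Spec_apply_short_keys_py cmd tokens (apply_short_keys_py cmd tokens)

-- ===== LEMMAS AND PROOFS =====
-- Invariant connecting B's fold (state (acc, none)) with A's lookahead recursion:
-- on well-formed suffixes, folding from (acc, none) appends exactly A's output and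
-- ends with no pending key.
theorem pvFoldB_eq_loopA (m : PySem.Dict String String) :
    ∀ (fuel : Nat) (ts : List String) (acc : List String), ts.length ≤ fuel →
      ts.foldl pvExpectBit false = false →
      ts.foldl (pvStepB m) (acc, none) = (acc ++ pvLoopA m fuel ts, none) := by
  intro fuel
  induction fuel with
  | zero =>
    intro ts acc hlen _
    have : ts = [] := List.eq_nil_of_length_eq_zero (Nat.le_zero.mp hlen)
    subst this; simp [pvLoopA]
  | succ n ih =>
    intro ts acc hlen hwf
    cases ts with
    | nil => simp [pvLoopA]
    | cons tok rest =>
      simp only [List.foldl_cons] at hwf ⊢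
      by_cases h1 : PySem.Str.isIn "=" tok = true
      · have h1c : PySem.Chars.isIn ['='] tok.toList = true := by simpa using h1
        have hbit : pvExpectBit false tok = false := by simp [pvExpectBit, h1c]
        rw [hbit] at hwf
        have hlen' : rest.length ≤ n := by simpa using Nat.succ_le_succ_iff.mp hlen
        have hstep : pvStepB m (acc, none) tok =
            (acc ++ [PySem.Str.join ""
              [PySem.Dict.getD m (((PySem.Str.splitMax? tok "=" 1).getD []).getD 0 "")
                 (((PySem.Str.splitMax? tok "=" 1).getD []).getD 0 ""), "=",
               ((PySem.Str.splitMax? tok "=" 1).getD []).getD 1 ""]], none) := by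
          simp [pvStepB, h1c]
        rw [hstep, ih rest _ hlen' hwf]
        simp [pvLoopA, h1c]
      · have h1c : PySem.Chars.isIn ['='] tok.toList = false := by
          simpa using (Bool.not_eq_true _).mp h1
        by_cases h2 : PySem.Str.isIn ":" tok = true
        · have h2c : PySem.Chars.isIn [':'] tok.toList = true := by simpa using h2
          have hbit : pvExpectBit false tok = false := by simp [pvExpectBit, h1c, h2c]
          rw [hbit] at hwf
          have hlen' : rest.length ≤ n := by simpa using Nat.succ_le_succ_iff.mp hlen
          have hstep : pvStepB m (acc, none) tok =
              (acc ++ [PySem.Str.join ""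
                [PySem.Dict.getD m (((PySem.Str.splitMax? tok ":" 1).getD []).getD 0 "")
                   (((PySem.Str.splitMax? tok ":" 1).getD []).getD 0 ""), "=",
                 ((PySem.Str.splitMax? tok ":" 1).getD []).getD 1 ""]], none) := by
            simp [pvStepB, h1c, h2c]
          rw [hstep, ih rest _ hlen' hwf]
          simp [pvLoopA, h1c, h2c]
        · have h2c : PySem.Chars.isIn [':'] tok.toList = false := by
            simpa using (Bool.not_eq_true _).mp h2
          have hbit : pvExpectBit false tok = true := by
            simp [pvExpectBit, h1c, h2c]
          rw [hbit] at hwf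
          have hstep : pvStepB m (acc, none) tok = (acc, some tok) := by
            simp [pvStepB, h1c, h2c]
          rw [hstep]
          cases rest with
          | nil => simp at hwf
          | cons v rest' =>
            simp only [List.foldl_cons] at hwf ⊢
            have hbit2 : pvExpectBit true v = false := by simp [pvExpectBit]
            rw [hbit2] at hwf
            have hstep2 : pvStepB m (acc, some tok) v =
                (acc ++ [PySem.Str.join "" [PySem.Dict.getD m tok tok, "=", v]], none) := by
              simp [pvStepB]
            rw [hstep2]
            have hlen' : rest'.length ≤ n := by
              simp only [List.length_cons] at hlen; omega
            rw [ih rest' _ hlen' hwf]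
            simp [pvLoopA, h1c, h2c]

-- ===== VERDICT =====
theorem apply_short_keys_py_spec : Claim_equal_apply_short_keys_py := by
  intro cmd tokens _hdom hpre
  unfold Spec_apply_short_keys_py apply_short_keys_py apply_short_keys_py_alt
  rw [pvFoldB_eq_loopA (PySem.Dict.getD pvShortKeys cmd (PySem.Dict.ofList []))
      tokens.length tokens [] (le_refl _) hpre]
  simp
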